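-- pv_equiv track=rewrite | github.com/htanaka1234/decide-me-v2 | decide_me/documents/context.py | _object_narrowed_scope
-- ===== SOURCE A (Python) =====
-- from typing import TYPE_CHECKING, Any
--
-- def _object_narrowed_scope(
--     requested_object_ids: list[str],
--     session_object_ids: set[str],
--     session_link_ids: set[str],
--     links_by_id: dict[str, dict[str, Any]],
-- ) -> tuple[set[str], set[str]]:
--     allowed_requested_ids = set(requested_object_ids) & session_object_ids
--     scoped_object_ids = set(allowed_requested_ids)
--     scoped_link_ids: set[str] = set()
--     changed = True
--     while changed:
--         changed = False
--         for link_id in session_link_ids: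
--             link = links_by_id.get(link_id)
--             if not link:
--                 continue
--             source_id = link.get("source_object_id")
--             target_id = link.get("target_object_id")
--             if source_id not in session_object_ids or target_id not in session_object_ids:
--                 continue
--             if source_id not in scoped_object_ids and target_id not in scoped_object_ids:
--                 continue
--             if link_id not in scoped_link_ids:
--                 scoped_link_ids.add(link_id)
--                 changed = True
--             for object_id in (source_id, target_id):
--                 if object_id and object_id not in scoped_object_ids:
--                     scoped_object_ids.add(object_id)
--                     changed = True
--     return scoped_object_ids, scoped_link_ids
-- ===== SOURCE B (Python) =====
-- def _object_narrowed_scope(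
--     requested_object_ids,
--     session_object_ids,
--     session_link_ids,
--     links_by_id,
-- ):
--     # Index phase: validate every session link once and build an adjacency
--     # map endpoint -> list of (link_id, source, target) triples.
--     adjacency = {}
--     for link_id in session_link_ids:
--         link = links_by_id.get(link_id)
--         if not link:
--             continue
--         source_id = link.get("source_object_id")
--         target_id = link.get("target_object_id")
--         if source_id in session_object_ids and target_id in session_object_ids:
--             edge = (link_id, source_id, target_id)
--             adjacency.setdefault(source_id, []).append(edge)
--             if target_id != source_id:
--                 adjacency.setdefault(target_id, []).append(edge)
--     # Flood fill from the seed objects, following the adjacency index only: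
--     # each object is expanded once, via an explicit stack.
--     scoped_object_ids = set(requested_object_ids) & session_object_ids
--     scoped_link_ids = set()
--     stack = list(scoped_object_ids)
--     while stack:
--         obj = stack.pop()
--         for link_id, source_id, target_id in adjacency.get(obj, ()):
--             if link_id not in scoped_link_ids:
--                 scoped_link_ids.add(link_id)
--             for object_id in (source_id, target_id):
--                 if object_id and object_id not in scoped_object_ids:
--                     scoped_object_ids.add(object_id)
--                     stack.append(object_id)
--     return scoped_object_ids, scoped_link_ids
-- ===== Notes on version B (the rewrite author's own statement) =====
-- stated objective: alternative
-- what changed: B builds an adjacency index endpoint->incident valid links in one pass and flood-fills from the seed objects with an explicit stack, expanding each object once, instead of A's fixpoint loop that rescans every session link (with dict lookups) each round.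
import Mathlib
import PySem

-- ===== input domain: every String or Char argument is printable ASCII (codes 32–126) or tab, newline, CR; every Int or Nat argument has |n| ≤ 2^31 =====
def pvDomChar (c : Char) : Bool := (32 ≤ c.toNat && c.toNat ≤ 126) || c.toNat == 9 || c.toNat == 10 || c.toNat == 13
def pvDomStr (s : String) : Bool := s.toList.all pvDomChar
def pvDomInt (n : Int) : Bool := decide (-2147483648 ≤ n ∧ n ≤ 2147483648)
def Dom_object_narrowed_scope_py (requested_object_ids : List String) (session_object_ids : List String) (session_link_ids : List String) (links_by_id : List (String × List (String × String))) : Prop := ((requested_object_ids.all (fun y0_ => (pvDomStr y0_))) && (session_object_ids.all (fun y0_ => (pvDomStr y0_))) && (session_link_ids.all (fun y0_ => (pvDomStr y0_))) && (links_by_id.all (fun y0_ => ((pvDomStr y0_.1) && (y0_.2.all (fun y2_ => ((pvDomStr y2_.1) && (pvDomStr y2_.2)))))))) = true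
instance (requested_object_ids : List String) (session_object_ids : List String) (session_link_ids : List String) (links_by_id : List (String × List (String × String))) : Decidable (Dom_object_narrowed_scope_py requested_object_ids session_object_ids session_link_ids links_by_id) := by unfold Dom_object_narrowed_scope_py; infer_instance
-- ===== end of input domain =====

-- B replaces A's fixpoint loop, which rescans every session link each round, by an adjacency
-- index (endpoint -> incident valid links) built once and a single flood fill from the seeds.
-- Both Pythons return a pair of SETS (unordered); each port serialises its two result sets
-- sorted — the canonical list representation of a finite set — so the list equality proved
-- below is exactly equality of the returned sets.

-- ===== PORT A =====
-- Core of A's loop body after the validity/session checks: the scoped-membership test,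
-- the guarded link insertion and the two guarded endpoint insertions (Python's guarded
-- `set.add` calls are ported as the appends they perform; `changed` is threaded through).
def pvCore (st : List String × List String × Bool) (lid s t : String) :
    List String × List String × Bool :=
  if !(st.1.contains s) && !(st.1.contains t) then st
  else
    let l1 : List String := if st.2.1.contains lid then st.2.1 else st.2.1 ++ [lid]
    let c1 : Bool := if st.2.1.contains lid then st.2.2 else true
    let o1 : List String := if s != "" && !(st.1.contains s) then st.1 ++ [s] else st.1
    let c2 : Bool := if s != "" && !(st.1.contains s) then true else c1
    let o2 : List String := if t != "" && !(o1.contains t) then o1 ++ [t] else o1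
    let c3 : Bool := if t != "" && !(o1.contains t) then true else c2
    (o2, l1, c3)

-- one `for link_id in session_link_ids` body: dict lookup, falsiness / session checks, then pvCore
def pvStepA (sess : List String) (lbi : List (String × List (String × String)))
    (st : List String × List String × Bool) (link_id : String) :
    List String × List String × Bool :=
  match List.lookup link_id lbi with
  | none => st
  | some link =>
    if link.isEmpty then st
    else
      match List.lookup "source_object_id" link, List.lookup "target_object_id" link with
      | some s, some t =>
        if !(sess.contains s) || !(sess.contains t) then st
        else pvCore st link_id s t
      | some _, none => st
      | none, _ => st

-- `while changed:` — each changing round inserts a fresh link id, so `length + 1` rounds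
-- always suffice (the fuel is a totality guard only; it is never exhausted)
def pvLoopA (sess : List String) (lbi : List (String × List (String × String)))
    (links : List String) : Nat → List String → List String → List String × List String
  | 0, o, l => (o, l)
  | fuel + 1, o, l =>
    match links.foldl (pvStepA sess lbi) (o, l, false) with
    | (o', l', ch) => if ch then pvLoopA sess lbi links fuel o' l' else (o', l')

def object_narrowed_scope_py (requested_object_ids : List String) (session_object_ids : List String)
    (session_link_ids : List String) (links_by_id : List (String × List (String × String))) :
    List String × List String :=
  let allowed_requested_ids := PySem.Set.inter (PySem.Set.ofList requested_object_ids) session_object_ids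
  let scoped_object_ids := PySem.Set.ofList allowed_requested_ids
  match pvLoopA session_object_ids links_by_id session_link_ids
      (session_link_ids.length + 1) scoped_object_ids PySem.Set.empty with
  | (o, l) => (PySem.List.sorted o (fun x => x) false, PySem.List.sorted l (fun x => x) false)

-- ===== PORT B =====
-- `adjacency.setdefault(k, []).append(e)`: extend the first entry of key k in place,
-- or append a fresh entry at the end
def pvAdjAdd (adj : List (String × List (String × String × String))) (k : String)
    (e : String × String × String) : List (String × List (String × String × String)) :=
  match adj with
  | [] => [(k, [e])]
  | (k', v) :: rest =>
    if k' = k then (k', v ++ [e]) :: rest else (k', v) :: pvAdjAdd rest k e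

-- one link of B's index phase: dict lookup, falsiness / session checks, then the
-- one or two adjacency entries
def pvIndex (sess : List String) (lbi : List (String × List (String × String)))
    (adj : List (String × List (String × String × String))) (link_id : String) :
    List (String × List (String × String × String)) :=
  match List.lookup link_id lbi with
  | none => adj
  | some link =>
    if link.isEmpty then adj
    else
      match List.lookup "source_object_id" link, List.lookup "target_object_id" link with
      | some s, some t =>
        if sess.contains s && sess.contains t then
          let adj1 := pvAdjAdd adj s (link_id, s, t)
          if t != s then pvAdjAdd adj1 t (link_id, s, t) else adj1
        else adj
      | some _, none => adj
      | none, _ => adj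

-- body of `for link_id, source_id, target_id in adjacency.get(obj, ())`: the guarded link
-- insertion, then the two guarded object insertions, each paired with a stack push
def pvVisit (st : List String × List String × List String) (e : String × String × String) :
    List String × List String × List String :=
  let l1 : List String := if st.2.1.contains e.1 then st.2.1 else st.2.1 ++ [e.1]
  let o1 : List String := if e.2.1 != "" && !(st.1.contains e.2.1) then st.1 ++ [e.2.1] else st.1
  let k1 : List String := if e.2.1 != "" && !(st.1.contains e.2.1) then e.2.1 :: st.2.2 else st.2.2
  let o2 : List String := if e.2.2 != "" && !(o1.contains e.2.2) then o1 ++ [e.2.2] else o1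
  let k2 : List String := if e.2.2 != "" && !(o1.contains e.2.2) then e.2.2 :: k1 else k1
  (o2, l1, k2)

-- `while stack:` — the stack is a cons-list with its top at the head (Python pushes and pops
-- at the END of its list; head-push/head-pop is the same LIFO discipline). Every push adds a
-- fresh object to the scope, which stays inside seeds ++ endpoints, so the fuel below is a
-- totality guard only; it is never exhausted.
def pvDFS (adj : List (String × List (String × String × String))) :
    Nat → List String → List String → List String → List String × List String
  | 0, o, l, _ => (o, l)
  | fuel + 1, o, l, stk =>
    match stk with
    | [] => (o, l)
    | obj :: rest =>
      match ((List.lookup obj adj).getD []).foldl pvVisit (o, l, rest) with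
      | (o', l', stk') => pvDFS adj fuel o' l' stk'

def object_narrowed_scope_py_alt (requested_object_ids : List String) (session_object_ids : List String)
    (session_link_ids : List String) (links_by_id : List (String × List (String × String))) :
    List String × List String :=
  let adj := session_link_ids.foldl (pvIndex session_object_ids links_by_id) []
  let seeds := PySem.Set.inter (PySem.Set.ofList requested_object_ids) session_object_ids
  -- `stack = list(scoped_object_ids)` popped from the end = the reversed list popped from the head
  match pvDFS adj (2 * requested_object_ids.length + 4 * session_link_ids.length + 1)
      seeds PySem.Set.empty seeds.reverse with
  | (o, l) => (PySem.List.sorted o (fun x => x) false, PySem.List.sorted l (fun x => x) false)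

-- ===== PRECONDITION & SPEC =====
def Spec_object_narrowed_scope_py (requested_object_ids : List String) (session_object_ids : List String) (session_link_ids : List String) (links_by_id : List (String × List (String × String))) (out : List String × List String) : Prop := out = object_narrowed_scope_py_alt requested_object_ids session_object_ids session_link_ids links_by_id
instance (requested_object_ids : List String) (session_object_ids : List String) (session_link_ids : List String) (links_by_id : List (String × List (String × String))) (out : List String × List String) : Decidable (Spec_object_narrowed_scope_py requested_object_ids session_object_ids session_link_ids links_by_id out) := by unfold Spec_object_narrowed_scope_py; infer_instance

-- ===== CLAIM (what is proved, stated in full; the proofs are below) =====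
def Claim_equal_object_narrowed_scope_py : Prop := ∀ (requested_object_ids : List String) (session_object_ids : List String) (session_link_ids : List String) (links_by_id : List (String × List (String × String))), Dom_object_narrowed_scope_py requested_object_ids session_object_ids session_link_ids links_by_id → Spec_object_narrowed_scope_py requested_object_ids session_object_ids session_link_ids links_by_id (object_narrowed_scope_py requested_object_ids session_object_ids session_link_ids links_by_id)

-- ===== LEMMAS AND PROOFS =====

-- Option-valued form of the shared link validation/projection
def pvAnn (sess : List String) (lbi : List (String × List (String × String)))
    (link_id : String) : Option (String × String × String) :=
  match List.lookup link_id lbi with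
  | none => none
  | some link =>
    if link.isEmpty then none
    else
      match List.lookup "source_object_id" link, List.lookup "target_object_id" link with
      | some s, some t =>
        if sess.contains s && sess.contains t then some (link_id, s, t) else none
      | some _, none => none
      | none, _ => none

-- the validated edge list
def pvE (sess : List String) (lbi : List (String × List (String × String)))
    (links : List String) : List (String × String × String) :=
  links.filterMap (pvAnn sess lbi)

-- the objects reachable from the seeds through validated edges ("" never traversed unless a seed)
inductive pvReach (sess : List String) (lbi : List (String × List (String × String)))
    (links : List String) (seeds : List String) : String → Prop
  | seed (x : String) : x ∈ seeds → pvReach sess lbi links seeds x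
  | stepS (lid s t x : String) : (lid, s, t) ∈ pvE sess lbi links → (x = s ∨ x = t) → x ≠ "" →
      pvReach sess lbi links seeds s → pvReach sess lbi links seeds x
  | stepT (lid s t x : String) : (lid, s, t) ∈ pvE sess lbi links → (x = s ∨ x = t) → x ≠ "" →
      pvReach sess lbi links seeds t → pvReach sess lbi links seeds x

def pvLinked (sess : List String) (lbi : List (String × List (String × String)))
    (links : List String) (seeds : List String) (lid : String) : Prop :=
  ∃ s t, (lid, s, t) ∈ pvE sess lbi links ∧
    (pvReach sess lbi links seeds s ∨ pvReach sess lbi links seeds t)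

-- edge e fully handled at state (o, l)
def pvDone (e : String × String × String) (o l : List String) : Prop :=
  e.1 ∈ l ∧ (e.2.1 ≠ "" → e.2.1 ∈ o) ∧ (e.2.2 ≠ "" → e.2.2 ∈ o)

def pvClosed (sess : List String) (lbi : List (String × List (String × String)))
    (links : List String) (o l : List String) : Prop :=
  ∀ e ∈ pvE sess lbi links, (e.2.1 ∈ o ∨ e.2.2 ∈ o) → pvDone e o l

def pvSoundO (sess : List String) (lbi : List (String × List (String × String)))
    (links seeds : List String) (o : List String) : Prop :=
  ∀ x ∈ o, pvReach sess lbi links seeds x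

def pvSoundL (sess : List String) (lbi : List (String × List (String × String)))
    (links seeds : List String) (l : List String) : Prop :=
  ∀ lid ∈ l, pvLinked sess lbi links seeds lid


-- ---------- shared basics ----------


theorem pvDone_mono {e : String × String × String} {o l o' l' : List String}
    (h : pvDone e o l) (ho : o ⊆ o') (hl : l ⊆ l') : pvDone e o' l' :=
  ⟨hl h.1, fun hs => ho (h.2.1 hs), fun ht => ho (h.2.2 ht)⟩

-- completeness from a closed, seed-containing state (shared by both ports)
theorem pvReach_mem {sess : List String} {lbi : List (String × List (String × String))}
    {links seeds o l : List String} (hseed : ∀ x ∈ seeds, x ∈ o)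
    (hcl : pvClosed sess lbi links o l) :
    ∀ x, pvReach sess lbi links seeds x → x ∈ o := by
  intro x hx
  induction hx with
  | seed y hy => exact hseed y hy
  | stepS lid s t y hE hy hne _ ih =>
    have hd := hcl (lid, s, t) hE (Or.inl ih)
    rcases hy with rfl | rfl
    · exact hd.2.1 hne
    · exact hd.2.2 hne
  | stepT lid s t y hE hy hne _ ih =>
    have hd := hcl (lid, s, t) hE (Or.inr ih)
    rcases hy with rfl | rfl
    · exact hd.2.1 hne
    · exact hd.2.2 hne

theorem pvLinked_mem {sess : List String} {lbi : List (String × List (String × String))}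
    {links seeds o l : List String} (hcl : pvClosed sess lbi links o l)
    (hre : ∀ x, pvReach sess lbi links seeds x → x ∈ o) :
    ∀ lid, pvLinked sess lbi links seeds lid → lid ∈ l := by
  rintro lid ⟨s, t, hE, hr⟩
  have hm : s ∈ o ∨ t ∈ o := hr.imp (hre s) (hre t)
  exact (hcl (lid, s, t) hE hm).1

-- ---------- A-side: round = fold over the validated edges ----------

def pvStepT (st : List String × List String × Bool) (e : String × String × String) :
    List String × List String × Bool :=
  pvCore st e.1 e.2.1 e.2.2

theorem pvStepA_eq (sess : List String) (lbi : List (String × List (String × String)))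
    (st : List String × List String × Bool) (lid : String) :
    pvStepA sess lbi st lid =
      match pvAnn sess lbi lid with
      | none => st
      | some e => pvStepT st e := by
  unfold pvStepA pvAnn pvStepT
  cases h : List.lookup lid lbi with
  | none => rfl
  | some link =>
    by_cases he : link.isEmpty = true
    · simp only [if_pos he]
    · simp only [if_neg he]
      cases hs : List.lookup "source_object_id" link with
      | none => rfl
      | some s =>
        cases ht : List.lookup "target_object_id" link with
        | none => rfl
        | some t =>
          dsimp only
          by_cases hc : (sess.contains s && sess.contains t) = true
          · have h1 : ¬((!sess.contains s || !sess.contains t) = true) := by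
              cases hcs : sess.contains s <;> cases hct : sess.contains t <;> simp_all
            rw [if_neg h1, if_pos hc]
          · have h1 : (!sess.contains s || !sess.contains t) = true := by
              cases hcs : sess.contains s <;> cases hct : sess.contains t <;> simp_all
            rw [if_pos h1, if_neg hc]

theorem pvRoundA_eq (sess : List String) (lbi : List (String × List (String × String))) :
    ∀ (links : List String) (st : List String × List String × Bool),
      links.foldl (pvStepA sess lbi) st = (pvE sess lbi links).foldl pvStepT st := by
  intro links
  induction links with
  | nil => intro st; rfl
  | cons lid rest ih =>
    intro st
    simp only [List.foldl_cons, pvE, List.filterMap_cons]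
    rw [pvStepA_eq]
    cases h : pvAnn sess lbi lid with
    | none => simpa [pvE] using ih st
    | some e => simpa [pvE] using ih (pvStepT st e)

theorem pvAnn_fst (sess : List String) (lbi : List (String × List (String × String)))
    (lid : String) (e : String × String × String) (h : pvAnn sess lbi lid = some e) :
    e.1 = lid := by
  unfold pvAnn at h
  cases hl : List.lookup lid lbi with
  | none => simp [hl] at h
  | some link =>
    rw [hl] at h
    by_cases he : link.isEmpty
    · simp [he] at h
    · simp only [he, if_false, Bool.false_eq_true] at h
      cases hs : List.lookup "source_object_id" link with
      | none => simp [hs] at h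
      | some s =>
        rw [hs] at h
        cases ht : List.lookup "target_object_id" link with
        | none => simp [ht] at h
        | some t =>
          rw [ht] at h
          dsimp only at h
          by_cases hc : (sess.contains s && sess.contains t) = true
          · rw [if_pos hc] at h
            injection h with h2
            rw [← h2]
          · rw [if_neg hc] at h
            cases h

theorem pvE_iff (sess : List String) (lbi : List (String × List (String × String)))
    (links : List String) (e : String × String × String) :
    e ∈ pvE sess lbi links ↔ e.1 ∈ links ∧ pvAnn sess lbi e.1 = some e := by
  unfold pvE
  rw [List.mem_filterMap]
  constructor
  · rintro ⟨a, ha, hann⟩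
    have := pvAnn_fst sess lbi a e hann
    subst this
    exact ⟨ha, hann⟩
  · rintro ⟨h1, h2⟩
    exact ⟨e.1, h1, h2⟩

theorem pvAddIf_subset (o : List String) (s : String) :
    o ⊆ (if (s != "" && !(o.contains s)) = true then o ++ [s] else o) := by
  split_ifs
  · exact List.subset_append_left _ _
  · exact List.Subset.refl _

theorem pvAddIf_mem (o : List String) (s : String) (hs : s ≠ "") :
    s ∈ (if (s != "" && !(o.contains s)) = true then o ++ [s] else o) := by
  by_cases hc : (s != "" && !(o.contains s)) = true
  · rw [if_pos hc]
    exact List.mem_append_right _ (List.mem_singleton.mpr rfl)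
  · rw [if_neg hc]
    have h1 : o.contains s = true := by
      cases h2 : o.contains s
      · exfalso
        apply hc
        have hnm : s ∉ o := by
          intro hmem
          simp at h2
          exact h2 hmem
        simpa [bne, hs] using hnm
      · rfl
    exact List.contains_iff_mem.mp h1

theorem pvLidAdd_mem (l : List String) (lid : String) :
    lid ∈ (if l.contains lid = true then l else l ++ [lid]) := by
  by_cases hc : l.contains lid = true
  · rw [if_pos hc]; exact List.contains_iff_mem.mp hc
  · rw [if_neg hc]; exact List.mem_append_right _ (List.mem_singleton.mpr rfl)

theorem pvStepT_subset (st : List String × List String × Bool) (e : String × String × String) :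
    st.1 ⊆ (pvStepT st e).1 ∧ st.2.1 ⊆ (pvStepT st e).2.1 := by
  simp only [pvStepT, pvCore]
  split_ifs <;> constructor <;> intro x hx <;> simp [hx]

theorem pvFoldT_subset (E : List (String × String × String)) :
    ∀ (st : List String × List String × Bool),
      st.1 ⊆ (E.foldl pvStepT st).1 ∧ st.2.1 ⊆ (E.foldl pvStepT st).2.1 := by
  induction E with
  | nil => intro st; exact ⟨List.Subset.refl _, List.Subset.refl _⟩
  | cons e es ih =>
    intro st
    rw [List.foldl_cons]
    obtain ⟨h1, h2⟩ := pvStepT_subset st e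
    obtain ⟨h3, h4⟩ := ih (pvStepT st e)
    exact ⟨h1.trans h3, h2.trans h4⟩

theorem pvStepT_flag_mono (o l : List String) (e : String × String × String) :
    (pvStepT (o, l, true) e).2.2 = true := by
  simp only [pvStepT, pvCore]
  split_ifs <;> rfl

theorem pvFoldT_flag_mono (E : List (String × String × String)) :
    ∀ (o l : List String), (E.foldl pvStepT (o, l, true)).2.2 = true := by
  induction E with
  | nil => intro o l; rfl
  | cons e es ih =>
    intro o l
    rw [List.foldl_cons]
    rcases hst : pvStepT (o, l, true) e with ⟨o', l', c'⟩
    have hc : c' = true := by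
      have := pvStepT_flag_mono o l e
      rw [hst] at this; exact this
    subst hc
    exact ih o' l'

theorem pvStepT_false (o l o' l' : List String) (e : String × String × String)
    (h : pvStepT (o, l, false) e = (o', l', false)) : o' = o ∧ l' = l := by
  simp only [pvStepT, pvCore] at h
  split_ifs at h <;> simp_all

theorem pvFoldT_false (E : List (String × String × String)) :
    ∀ (o l o' l' : List String), E.foldl pvStepT (o, l, false) = (o', l', false) →
      o' = o ∧ l' = l := by
  induction E with
  | nil =>
    intro o l o' l' h
    injection h with h1 h2; injection h2 with h2 _
    exact ⟨h1.symm, h2.symm⟩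
  | cons e es ih =>
    intro o l o' l' h
    rw [List.foldl_cons] at h
    rcases hst : pvStepT (o, l, false) e with ⟨o₀, l₀, c₀⟩
    rw [hst] at h
    cases c₀ with
    | false =>
      obtain ⟨h1, h2⟩ := pvStepT_false o l o₀ l₀ e hst
      subst h1; subst h2
      exact ih _ _ _ _ h
    | true =>
      exfalso
      have := pvFoldT_flag_mono es o₀ l₀
      rw [h] at this
      exact Bool.false_ne_true this

-- both endpoints of a triple are empty or already scoped
def pvEpOk (o : List String) (e : String × String × String) : Prop :=
  (e.2.1 = "" ∨ e.2.1 ∈ o) ∧ (e.2.2 = "" ∨ e.2.2 ∈ o)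

-- every scoped link has its endpoints scoped (or empty)
def pvInv (sess : List String) (lbi : List (String × List (String × String)))
    (o l : List String) : Prop :=
  ∀ e, pvAnn sess lbi e.1 = some e → e.1 ∈ l → pvEpOk o e

-- measure: link ids of E not yet scoped
def pvMu (E : List (String × String × String)) (l : List String) : Nat :=
  ((E.map (·.1)).filter (fun x => !(l.contains x))).length

theorem pvStepT_inv (sess : List String) (lbi : List (String × List (String × String)))
    (o l : List String) (c : Bool) (e : String × String × String)
    (ha : pvAnn sess lbi e.1 = some e) (hinv : pvInv sess lbi o l) :
    pvInv sess lbi (pvStepT (o, l, c) e).1 (pvStepT (o, l, c) e).2.1 ∧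
      ((pvStepT (o, l, c) e).2.2 = true →
        c = true ∨ (e.1 ∉ l ∧ e.1 ∈ (pvStepT (o, l, c) e).2.1)) := by
  by_cases hu : (!(o.contains e.2.1) && !(o.contains e.2.2)) = true
  · have hid : pvStepT (o, l, c) e = (o, l, c) := by
      simp only [pvStepT, pvCore, if_pos hu]
    rw [hid]
    exact ⟨hinv, fun hc => Or.inl hc⟩
  · by_cases hmem : e.1 ∈ l
    · have hep := hinv e ha hmem
      have hs' : (e.2.1 != "" && !(o.contains e.2.1)) = false := by
        rcases hep.1 with h' | h'
        · simp [h']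
        · simp [List.contains_iff_mem.mpr h']
          exact fun _ => h'
      have ht' : (e.2.2 != "" && !(o.contains e.2.2)) = false := by
        rcases hep.2 with h' | h'
        · simp [h']
        · simp [List.contains_iff_mem.mpr h']
          exact fun _ => h'
      have hl : l.contains e.1 = true := List.contains_iff_mem.mpr hmem
      have hid : pvStepT (o, l, c) e = (o, l, c) := by
        simp only [pvStepT, pvCore, if_neg hu, hs', ht', hl, Bool.false_eq_true, if_false,
          eq_self_iff_true, if_true]
      rw [hid]
      exact ⟨hinv, fun hc => Or.inl hc⟩
    · have hlc : l.contains e.1 = false := by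
        cases h2 : l.contains e.1
        · rfl
        · exact absurd (List.contains_iff_mem.mp h2) hmem
      simp only [pvStepT, pvCore, if_neg hu, hlc, Bool.false_eq_true, if_false, ite_self]
      constructor
      · intro e' ha' hm'
        rcases List.mem_append.mp hm' with hm' | hm'
        · have hep := hinv e' ha' hm'
          have hsub : o ⊆ (if (e.2.2 != "" &&
              !((if (e.2.1 != "" && !(o.contains e.2.1)) = true then o ++ [e.2.1] else o).contains e.2.2)) = true
              then (if (e.2.1 != "" && !(o.contains e.2.1)) = true then o ++ [e.2.1] else o) ++ [e.2.2]
              else (if (e.2.1 != "" && !(o.contains e.2.1)) = true then o ++ [e.2.1] else o)) :=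
            (pvAddIf_subset o e.2.1).trans (pvAddIf_subset _ e.2.2)
          exact ⟨hep.1.imp id (fun h => hsub h), hep.2.imp id (fun h => hsub h)⟩
        · have he' : e'.1 = e.1 := List.mem_singleton.mp hm'
          have heq : e' = e := by
            rw [he'] at ha'
            exact Option.some.inj (ha'.symm.trans ha)
          subst heq
          constructor
          · by_cases hs0 : e'.2.1 = ""
            · exact Or.inl hs0
            · exact Or.inr ((pvAddIf_subset _ e'.2.2) (pvAddIf_mem o e'.2.1 hs0))
          · by_cases ht0 : e'.2.2 = ""
            · exact Or.inl ht0
            · exact Or.inr (pvAddIf_mem _ e'.2.2 ht0)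
      · intro _
        exact Or.inr ⟨hmem, List.mem_append_right _ (List.mem_singleton.mpr rfl)⟩

theorem pvFoldT_inv (sess : List String) (lbi : List (String × List (String × String))) :
    ∀ (E : List (String × String × String)) (o l : List String) (c : Bool),
      (∀ e ∈ E, pvAnn sess lbi e.1 = some e) → pvInv sess lbi o l →
      pvInv sess lbi (E.foldl pvStepT (o, l, c)).1 (E.foldl pvStepT (o, l, c)).2.1 ∧
        ((E.foldl pvStepT (o, l, c)).2.2 = true →
          c = true ∨ ∃ x, x ∈ E.map (·.1) ∧ x ∉ l ∧ x ∈ (E.foldl pvStepT (o, l, c)).2.1) := by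
  intro E
  induction E with
  | nil => intro o l c _ hinv; exact ⟨hinv, fun hc => Or.inl hc⟩
  | cons e es ih =>
    intro o l c hann hinv
    rcases hst : pvStepT (o, l, c) e with ⟨o', l', c'⟩
    have hstep := pvStepT_inv sess lbi o l c e (hann e (List.mem_cons_self ..)) hinv
    rw [hst] at hstep
    have hrec := ih o' l' c' (fun e' he' => hann e' (List.mem_cons_of_mem _ he')) hstep.1
    have hsub := pvFoldT_subset es (o', l', c')
    have hsub0 : o ⊆ o' ∧ l ⊆ l' := by
      have h := pvStepT_subset (o, l, c) e
      rw [hst] at h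
      exact h
    rw [List.foldl_cons, hst]
    refine ⟨hrec.1, fun hc1 => ?_⟩
    rcases hrec.2 hc1 with hc' | ⟨x, hx1, hx2, hx3⟩
    · rcases hstep.2 hc' with hc | ⟨hm1, hm2⟩
      · exact Or.inl hc
      · exact Or.inr ⟨e.1, by simp, hm1, hsub.2 hm2⟩
    · refine Or.inr ⟨x, by simp [hx1], fun hxl => hx2 (hsub0.2 hxl), hx3⟩

theorem pvFilter_len_lt (xs : List String) (P Q : String → Bool)
    (hPQ : ∀ y, Q y = true → P y = true) (x : String) (hx : x ∈ xs)
    (hP : P x = true) (hQ : Q x = false) :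
    (xs.filter Q).length < (xs.filter P).length := by
  have hle : ∀ (ys : List String), (ys.filter Q).length ≤ (ys.filter P).length := by
    intro ys
    induction ys with
    | nil => simp
    | cons a t ih =>
      by_cases hq : Q a = true
      · simp [List.filter_cons, hq, hPQ a hq]
        omega
      · simp only [List.filter_cons, hq, if_false, Bool.false_eq_true]
        by_cases hp : P a = true <;> simp [hp] <;> omega
  induction xs with
  | nil => cases hx
  | cons a t ih =>
    rcases List.mem_cons.mp hx with rfl | hx'
    · simp [List.filter_cons, hP, hQ]
      exact hle t
    · by_cases hq : Q a = true
      · simp [List.filter_cons, hq, hPQ a hq]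
        exact ih hx'
      · simp only [List.filter_cons, hq, if_false, Bool.false_eq_true]
        by_cases hp : P a = true <;> simp [hp]
        · exact le_of_lt (ih hx')
        · exact ih hx'

theorem pvMu_lt {E : List (String × String × String)} {l l' : List String}
    (hsub : l ⊆ l') (x : String) (hxE : x ∈ E.map (·.1)) (hxl : x ∉ l) (hxl' : x ∈ l') :
    pvMu E l' < pvMu E l := by
  unfold pvMu
  refine pvFilter_len_lt _ _ _ ?_ x hxE ?_ ?_
  · intro y hy
    have hy' : y ∉ l' := by
      intro hmem
      rw [List.contains_iff_mem.mpr hmem] at hy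
      cases hy
    have : l.contains y = false := by
      cases h2 : l.contains y
      · rfl
      · exact absurd (hsub (List.contains_iff_mem.mp h2)) hy'
    rw [this]; rfl
  · have : l.contains x = false := by
      cases h2 : l.contains x
      · rfl
      · exact absurd (List.contains_iff_mem.mp h2) hxl
    rw [this]; rfl
  · rw [List.contains_iff_mem.mpr hxl']; rfl

-- soundness + uniqueness preserved by one A-step on a validated edge
theorem pvStepT_sound {sess : List String} {lbi : List (String × List (String × String))}
    {links seeds : List String} {o l : List String} {c : Bool}
    {e : String × String × String} (hE : e ∈ pvE sess lbi links)
    (hso : pvSoundO sess lbi links seeds o) (hsl : pvSoundL sess lbi links seeds l)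
    (hno : o.Nodup) (hnl : l.Nodup) :
    pvSoundO sess lbi links seeds (pvStepT (o, l, c) e).1 ∧
      pvSoundL sess lbi links seeds (pvStepT (o, l, c) e).2.1 ∧
      (pvStepT (o, l, c) e).1.Nodup ∧ (pvStepT (o, l, c) e).2.1.Nodup := by
  have hre : (o.contains e.2.1 || o.contains e.2.2) = true →
      pvReach sess lbi links seeds e.2.1 ∨ pvReach sess lbi links seeds e.2.2 := by
    intro hc
    rcases Bool.or_eq_true_iff.mp hc with h | h
    · exact Or.inl (hso _ (List.contains_iff_mem.mp h))
    · exact Or.inr (hso _ (List.contains_iff_mem.mp h))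
  by_cases hu : (!(o.contains e.2.1) && !(o.contains e.2.2)) = true
  · have hid : pvStepT (o, l, c) e = (o, l, c) := by
      simp only [pvStepT, pvCore, if_pos hu]
    rw [hid]
    exact ⟨hso, hsl, hno, hnl⟩
  · have hor : pvReach sess lbi links seeds e.2.1 ∨ pvReach sess lbi links seeds e.2.2 := by
      apply hre
      cases h1 : o.contains e.2.1 <;> cases h2 : o.contains e.2.2 <;> simp_all
    have hrE : (e.1, e.2.1, e.2.2) ∈ pvE sess lbi links := by
      simpa using hE
    simp only [pvStepT, pvCore, if_neg hu]
    refine ⟨?_, ?_, ?_, ?_⟩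
    · -- objects sound
      intro x hx
      by_cases h1 : (e.2.1 != "" && !(o.contains e.2.1)) = true
      · rw [if_pos h1] at hx
        by_cases h2 : (e.2.2 != "" && !((o ++ [e.2.1]).contains e.2.2)) = true
        · rw [if_pos h2] at hx
          rcases List.mem_append.mp hx with hx | hx
          · rcases List.mem_append.mp hx with hx | hx
            · exact hso x hx
            · have hx1 : x = e.2.1 := List.mem_singleton.mp hx
              rw [hx1]
              have hne : e.2.1 ≠ "" := by
                intro h; rw [h] at h1; simp at h1
              rcases hor with h | h
              · exact pvReach.stepS e.1 e.2.1 e.2.2 e.2.1 hrE (Or.inl rfl) hne h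
              · exact pvReach.stepT e.1 e.2.1 e.2.2 e.2.1 hrE (Or.inl rfl) hne h
          · have hx1 : x = e.2.2 := List.mem_singleton.mp hx
            rw [hx1]
            have hne : e.2.2 ≠ "" := by
              intro h; rw [h] at h2; simp at h2
            rcases hor with h | h
            · exact pvReach.stepS e.1 e.2.1 e.2.2 e.2.2 hrE (Or.inr rfl) hne h
            · exact pvReach.stepT e.1 e.2.1 e.2.2 e.2.2 hrE (Or.inr rfl) hne h
        · rw [if_neg h2] at hx
          rcases List.mem_append.mp hx with hx | hx
          · exact hso x hx
          · have hx1 : x = e.2.1 := List.mem_singleton.mp hx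
            rw [hx1]
            have hne : e.2.1 ≠ "" := by
              intro h; rw [h] at h1; simp at h1
            rcases hor with h | h
            · exact pvReach.stepS e.1 e.2.1 e.2.2 e.2.1 hrE (Or.inl rfl) hne h
            · exact pvReach.stepT e.1 e.2.1 e.2.2 e.2.1 hrE (Or.inl rfl) hne h
      · rw [if_neg h1] at hx
        by_cases h2 : (e.2.2 != "" && !(o.contains e.2.2)) = true
        · rw [if_pos h2] at hx
          rcases List.mem_append.mp hx with hx | hx
          · exact hso x hx
          · have hx1 : x = e.2.2 := List.mem_singleton.mp hx
            rw [hx1]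
            have hne : e.2.2 ≠ "" := by
              intro h; rw [h] at h2; simp at h2
            rcases hor with h | h
            · exact pvReach.stepS e.1 e.2.1 e.2.2 e.2.2 hrE (Or.inr rfl) hne h
            · exact pvReach.stepT e.1 e.2.1 e.2.2 e.2.2 hrE (Or.inr rfl) hne h
        · rw [if_neg h2] at hx
          exact hso x hx
    · -- links sound
      intro lid hl
      by_cases h1 : l.contains e.1 = true
      · rw [if_pos h1] at hl
        exact hsl lid hl
      · rw [if_neg h1] at hl
        rcases List.mem_append.mp hl with hl | hl
        · exact hsl lid hl
        · have : lid = e.1 := List.mem_singleton.mp hl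
          subst this
          exact ⟨e.2.1, e.2.2, hrE, hor⟩
    · -- objects nodup
      have hno1 : (if (e.2.1 != "" && !(o.contains e.2.1)) = true then o ++ [e.2.1] else o).Nodup := by
        by_cases h1 : (e.2.1 != "" && !(o.contains e.2.1)) = true
        · rw [if_pos h1]
          have : e.2.1 ∉ o := by
            intro hmem
            rw [Bool.and_eq_true] at h1
            rw [List.contains_iff_mem.mpr hmem] at h1
            simp at h1
          rw [List.nodup_append]
          exact ⟨hno, List.nodup_singleton _, by intro a ha b hb hab; rw [List.mem_singleton.mp hb] at hab; exact this (hab ▸ ha)⟩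
        · rw [if_neg h1]; exact hno
      by_cases h2 : (e.2.2 != "" &&
          !((if (e.2.1 != "" && !(o.contains e.2.1)) = true then o ++ [e.2.1] else o).contains e.2.2)) = true
      · rw [if_pos h2]
        have : e.2.2 ∉ (if (e.2.1 != "" && !(o.contains e.2.1)) = true then o ++ [e.2.1] else o) := by
          intro hmem
          rw [Bool.and_eq_true] at h2
          rw [List.contains_iff_mem.mpr hmem] at h2
          simp at h2
        rw [List.nodup_append]
        exact ⟨hno1, List.nodup_singleton _, by intro a ha b hb hab; rw [List.mem_singleton.mp hb] at hab; exact this (hab ▸ ha)⟩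
      · rw [if_neg h2]; exact hno1
    · -- links nodup
      by_cases h1 : l.contains e.1 = true
      · rw [if_pos h1]; exact hnl
      · rw [if_neg h1]
        have : e.1 ∉ l := by
          intro hmem
          rw [List.contains_iff_mem.mpr hmem] at h1
          exact h1 rfl
        rw [List.nodup_append]
        exact ⟨hnl, List.nodup_singleton _, by intro a ha b hb hab; rw [List.mem_singleton.mp hb] at hab; exact this (hab ▸ ha)⟩

theorem pvFoldT_sound {sess : List String} {lbi : List (String × List (String × String))}
    {links seeds : List String} :
    ∀ (E : List (String × String × String)) (o l : List String) (c : Bool),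
      (∀ e ∈ E, e ∈ pvE sess lbi links) →
      pvSoundO sess lbi links seeds o → pvSoundL sess lbi links seeds l →
      o.Nodup → l.Nodup →
      pvSoundO sess lbi links seeds (E.foldl pvStepT (o, l, c)).1 ∧
        pvSoundL sess lbi links seeds (E.foldl pvStepT (o, l, c)).2.1 ∧
        (E.foldl pvStepT (o, l, c)).1.Nodup ∧ (E.foldl pvStepT (o, l, c)).2.1.Nodup := by
  intro E
  induction E with
  | nil => intro o l c _ hso hsl hno hnl; exact ⟨hso, hsl, hno, hnl⟩
  | cons e es ih =>
    intro o l c hE hso hsl hno hnl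
    rw [List.foldl_cons]
    rcases hst : pvStepT (o, l, c) e with ⟨o1, l1, c1⟩
    have h := pvStepT_sound (seeds := seeds) (c := c) (hE e (List.mem_cons_self ..)) hso hsl hno hnl
    rw [hst] at h
    exact ih o1 l1 c1 (fun e' he' => hE e' (List.mem_cons_of_mem _ he')) h.1 h.2.1 h.2.2.1 h.2.2.2

-- a state unchanged by a full round is closed
theorem pvStepT_append (st : List String × List String × Bool) (e : String × String × String) :
    ∃ u v, (pvStepT st e).1 = st.1 ++ u ∧ (pvStepT st e).2.1 = st.2.1 ++ v := by
  have h : st.1 <+: (pvStepT st e).1 ∧ st.2.1 <+: (pvStepT st e).2.1 := by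
    simp only [pvStepT, pvCore]
    split_ifs <;> constructor <;>
      first
        | exact List.prefix_rfl
        | exact List.prefix_append _ _
        | exact (List.prefix_append _ _).trans (List.prefix_append _ _)
  obtain ⟨⟨u, hu⟩, ⟨v, hv⟩⟩ := h
  exact ⟨u, v, hu.symm, hv.symm⟩

theorem pvFoldT_append (E : List (String × String × String)) :
    ∀ (st : List String × List String × Bool),
      ∃ u v, (E.foldl pvStepT st).1 = st.1 ++ u ∧ (E.foldl pvStepT st).2.1 = st.2.1 ++ v := by
  induction E with
  | nil => intro st; exact ⟨[], [], by simp, by simp⟩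
  | cons e es ih =>
    intro st
    rw [List.foldl_cons]
    obtain ⟨u1, v1, hu1, hv1⟩ := pvStepT_append st e
    obtain ⟨u2, v2, hu2, hv2⟩ := ih (pvStepT st e)
    exact ⟨u1 ++ u2, v1 ++ v2, by rw [hu2, hu1, List.append_assoc],
      by rw [hv2, hv1, List.append_assoc]⟩

theorem pvFoldT_fix_each (E : List (String × String × String)) :
    ∀ (o l : List String), E.foldl pvStepT (o, l, false) = (o, l, false) →
      ∀ e ∈ E, pvStepT (o, l, false) e = (o, l, false) := by
  induction E with
  | nil => intro o l _ e he; cases he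
  | cons e0 es ih =>
    intro o l h e he
    rw [List.foldl_cons] at h
    rcases hst : pvStepT (o, l, false) e0 with ⟨o1, l1, c1⟩
    rw [hst] at h
    have hc1 : c1 = false := by
      cases c1
      · rfl
      · exfalso
        have := pvFoldT_flag_mono es o1 l1
        rw [h] at this
        exact Bool.false_ne_true this
    subst hc1
    obtain ⟨u1, v1, hu1, hv1⟩ := pvStepT_append (o, l, false) e0
    rw [hst] at hu1 hv1
    obtain ⟨u2, v2, hu2, hv2⟩ := pvFoldT_append es (o1, l1, false)
    rw [h] at hu2 hv2
    dsimp only at hu1 hv1 hu2 hv2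
    have ho1 : o1 = o := by
      have : o = o ++ (u1 ++ u2) := by rw [← List.append_assoc, ← hu1, hu2]
      have hu : u1 ++ u2 = [] := by
        have := congrArg List.length this
        simp at this
        simp [this.1, this.2]
      have hu1' : u1 = [] := by
        cases hx : u1
        · rfl
        · rw [hx] at hu; simp at hu
      rw [hu1', List.append_nil] at hu1
      exact hu1
    have hl1 : l1 = l := by
      have : l = l ++ (v1 ++ v2) := by rw [← List.append_assoc, ← hv1, hv2]
      have hv : v1 ++ v2 = [] := by
        have := congrArg List.length this
        simp at this
        simp [this.1, this.2]
      have hv1' : v1 = [] := by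
        cases hx : v1
        · rfl
        · rw [hx] at hv; simp at hv
      rw [hv1', List.append_nil] at hv1
      exact hv1
    subst ho1; subst hl1
    rcases List.mem_cons.mp he with rfl | he'
    · exact hst
    · exact ih _ _ h e he'

theorem pvStepT_fix_closed {o l : List String} {e : String × String × String}
    (h : pvStepT (o, l, false) e = (o, l, false)) (hm : e.2.1 ∈ o ∨ e.2.2 ∈ o) :
    pvDone e o l := by
  have hu : ¬((!(o.contains e.2.1) && !(o.contains e.2.2)) = true) := by
    rcases hm with h | h
    · rw [List.contains_iff_mem.mpr h]; simp
    · rw [List.contains_iff_mem.mpr h]; simp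
  simp only [pvStepT, pvCore, if_neg hu] at h
  have h1 := congrArg Prod.fst h
  have h2 := congrArg (fun p => p.2.1) h
  dsimp only at h1 h2
  -- l side
  have hlid : e.1 ∈ l := by
    rw [← h2]
    exact pvLidAdd_mem l e.1
  -- o side: the inner add is a prefix of the outer add, both collapse to o
  have ho1 : (if (e.2.1 != "" && !(o.contains e.2.1)) = true then o ++ [e.2.1] else o) = o := by
    by_cases hg : (e.2.1 != "" && !(o.contains e.2.1)) = true
    · exfalso
      rw [if_pos hg] at h1
      by_cases hg2 : (e.2.2 != "" && !((o ++ [e.2.1]).contains e.2.2)) = true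
      · rw [if_pos hg2] at h1
        have := congrArg List.length h1
        simp at this
      · rw [if_neg hg2] at h1
        have := congrArg List.length h1
        simp at this
    · rw [if_neg hg]
  refine ⟨hlid, ?_, ?_⟩
  · intro hs
    have := pvAddIf_mem o e.2.1 hs
    rw [ho1] at this
    exact this
  · intro ht
    have hmem := pvAddIf_mem (if (e.2.1 != "" && !(o.contains e.2.1)) = true then o ++ [e.2.1] else o) e.2.2 ht
    rw [ho1] at hmem h1
    rw [← h1]
    exact hmem

-- the A loop: invariants in, closed fixpoint out
theorem pvLoopA_correct (sess : List String) (lbi : List (String × List (String × String)))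
    (links seeds : List String) :
    ∀ (fuel : Nat) (o l : List String),
      pvSoundO sess lbi links seeds o → pvSoundL sess lbi links seeds l →
      pvInv sess lbi o l → o.Nodup → l.Nodup →
      pvMu (pvE sess lbi links) l < fuel →
      ∃ o' l', pvLoopA sess lbi links fuel o l = (o', l') ∧
        pvSoundO sess lbi links seeds o' ∧ pvSoundL sess lbi links seeds l' ∧
        o'.Nodup ∧ l'.Nodup ∧ (∀ x ∈ o, x ∈ o') ∧ pvClosed sess lbi links o' l' := by
  intro fuel
  induction fuel with
  | zero => intro o l _ _ _ _ _ hmu; omega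
  | succ n ih =>
    intro o l hso hsl hinv hno hnl hmu
    simp only [pvLoopA]
    rw [pvRoundA_eq]
    rcases hF : (pvE sess lbi links).foldl pvStepT (o, l, false) with ⟨o1, l1, ch⟩
    have hann : ∀ e ∈ pvE sess lbi links, pvAnn sess lbi e.1 = some e :=
      fun e he => ((pvE_iff sess lbi links e).mp he).2
    have hSnd := pvFoldT_sound (seeds := seeds) (pvE sess lbi links) o l false
      (fun e he => he) hso hsl hno hnl
    rw [hF] at hSnd
    have hInv2 := pvFoldT_inv sess lbi (pvE sess lbi links) o l false hann hinv
    rw [hF] at hInv2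
    have hsub := pvFoldT_subset (pvE sess lbi links) (o, l, false)
    rw [hF] at hsub
    cases ch with
    | false =>
      obtain ⟨h1, h2⟩ := pvFoldT_false _ _ _ _ _ hF
      subst h1; subst h2
      exact ⟨_, _, rfl, hSnd.1, hSnd.2.1, hSnd.2.2.1, hSnd.2.2.2, fun x hx => hsub.1 hx,
        fun e he hm => pvStepT_fix_closed (pvFoldT_fix_each _ _ _ hF e he) hm⟩
    | true =>
      have hgrow := hInv2.2 rfl
      rcases hgrow with hcf | ⟨x, hx1, hx2, hx3⟩
      · cases hcf
      · have hmu1 : pvMu (pvE sess lbi links) l1 < n := by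
          have := pvMu_lt (E := pvE sess lbi links) hsub.2 x hx1 hx2 hx3
          dsimp only at this
          omega
        obtain ⟨o', l', hrec, hp⟩ :=
          ih o1 l1 hSnd.1 hSnd.2.1 hInv2.1 hSnd.2.2.1 hSnd.2.2.2 hmu1
        exact ⟨o', l', by simpa using hrec, hp.1, hp.2.1, hp.2.2.1, hp.2.2.2.1,
          fun y hy => hp.2.2.2.2.1 y (hsub.1 hy), hp.2.2.2.2.2⟩

-- ---------- B-side: adjacency characterisation ----------

theorem mem_pvAdjAdd (adj : List (String × List (String × String × String)))
    (k x : String) (e e' : String × String × String) :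
    (e' ∈ (List.lookup x (pvAdjAdd adj k e)).getD []) ↔
      (e' ∈ (List.lookup x adj).getD [] ∨ (x = k ∧ e' = e)) := by
  induction adj with
  | nil =>
    simp only [pvAdjAdd, List.lookup]
    by_cases hx : x = k
    · subst hx
      simp [List.lookup]
    · have : (x == k) = false := by simp [hx]
      simp [List.lookup, this, hx]
  | cons p rest ih =>
    rcases p with ⟨k', v⟩
    simp only [pvAdjAdd]
    by_cases hk : k' = k
    · subst hk
      by_cases hx : x = k'
      · subst hx
        simp [List.lookup]
      · have hxk : (x == k') = false := by simp [hx]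
        simp [List.lookup, hxk, hx]
    · rw [if_neg hk]
      by_cases hx : x = k'
      · subst hx
        have hxk : x ≠ k := hk
        simp [List.lookup, hxk]
      · have hxk : (x == k') = false := by simp [hx]
        simp only [List.lookup, hxk]
        exact ih

theorem pvIndex_eq (sess : List String) (lbi : List (String × List (String × String)))
    (adj : List (String × List (String × String × String))) (lid : String) :
    pvIndex sess lbi adj lid =
      match pvAnn sess lbi lid with
      | none => adj
      | some e =>
        let adj1 := pvAdjAdd adj e.2.1 e
        if e.2.2 != e.2.1 then pvAdjAdd adj1 e.2.2 e else adj1 := by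
  unfold pvIndex pvAnn
  cases h : List.lookup lid lbi with
  | none => rfl
  | some link =>
    by_cases he : link.isEmpty = true
    · simp only [if_pos he]
    · simp only [if_neg he]
      cases hs : List.lookup "source_object_id" link with
      | none => rfl
      | some s =>
        cases ht : List.lookup "target_object_id" link with
        | none => rfl
        | some t =>
          dsimp only
          by_cases hc : (sess.contains s && sess.contains t) = true
          · rw [if_pos hc, if_pos hc]
          · rw [if_neg hc, if_neg hc]

theorem pvAdjFold (sess : List String) (lbi : List (String × List (String × String))) :
    ∀ (ls : List String) (adj : List (String × List (String × String × String)))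
      (x : String) (e : String × String × String),
      e ∈ (List.lookup x (ls.foldl (pvIndex sess lbi) adj)).getD [] ↔
        (e ∈ (List.lookup x adj).getD [] ∨
          (e.1 ∈ ls ∧ pvAnn sess lbi e.1 = some e ∧ (x = e.2.1 ∨ x = e.2.2))) := by
  intro ls
  induction ls with
  | nil => simp
  | cons lid rest ih =>
    intro adj x e
    rw [List.foldl_cons, ih]
    have hstep : e ∈ (List.lookup x (pvIndex sess lbi adj lid)).getD [] ↔
        (e ∈ (List.lookup x adj).getD [] ∨
          (e.1 = lid ∧ pvAnn sess lbi e.1 = some e ∧ (x = e.2.1 ∨ x = e.2.2))) := by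
      rw [pvIndex_eq]
      cases ha : pvAnn sess lbi lid with
      | none =>
        dsimp only
        constructor
        · exact Or.inl
        · rintro (h | ⟨h1, h2, _⟩)
          · exact h
          · rw [h1] at h2
            rw [ha] at h2
            cases h2
      | some e0 =>
        have he0 : e0.1 = lid := pvAnn_fst sess lbi lid e0 ha
        dsimp only
        by_cases hts : (e0.2.2 != e0.2.1) = true
        · rw [if_pos hts, mem_pvAdjAdd, mem_pvAdjAdd]
          constructor
          · rintro ((h | ⟨h1, h2⟩) | ⟨h1, h2⟩)
            · exact Or.inl h
            · subst h2
              exact Or.inr ⟨he0, he0 ▸ ha, Or.inl h1⟩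
            · subst h2
              exact Or.inr ⟨he0, he0 ▸ ha, Or.inr h1⟩
          · rintro (h | ⟨h1, h2, h3⟩)
            · exact Or.inl (Or.inl h)
            · have : e = e0 := by
                rw [h1] at h2
                rw [ha] at h2
                exact (Option.some.inj h2).symm
              subst this
              rcases h3 with h3 | h3
              · exact Or.inl (Or.inr ⟨h3, rfl⟩)
              · exact Or.inr ⟨h3, rfl⟩
        · rw [if_neg hts, mem_pvAdjAdd]
          have hts' : e0.2.2 = e0.2.1 := by
            simpa using hts
          constructor
          · rintro (h | ⟨h1, h2⟩)
            · exact Or.inl h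
            · subst h2
              exact Or.inr ⟨he0, he0 ▸ ha, Or.inl h1⟩
          · rintro (h | ⟨h1, h2, h3⟩)
            · exact Or.inl h
            · have : e = e0 := by
                rw [h1] at h2
                rw [ha] at h2
                exact (Option.some.inj h2).symm
              subst this
              rcases h3 with h3 | h3
              · exact Or.inr ⟨h3, rfl⟩
              · exact Or.inr ⟨by rw [h3, hts'], rfl⟩
    rw [hstep]
    constructor
    · rintro ((h | ⟨h1, h2, h3⟩) | ⟨h1, h2, h3⟩)
      · exact Or.inl h
      · exact Or.inr ⟨by simp [h1], h2, h3⟩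
      · exact Or.inr ⟨List.mem_cons_of_mem _ h1, h2, h3⟩
    · rintro (h | ⟨h1, h2, h3⟩)
      · exact Or.inl (Or.inl h)
      · rcases List.mem_cons.mp h1 with h1 | h1
        · exact Or.inl (Or.inr ⟨h1, h2, h3⟩)
        · exact Or.inr ⟨h1, h2, h3⟩

-- final form: the adjacency of x holds exactly the validated edges touching x
theorem pvAdj_char (sess : List String) (lbi : List (String × List (String × String)))
    (links : List String) (x : String) (e : String × String × String) :
    e ∈ (List.lookup x (links.foldl (pvIndex sess lbi) [])).getD [] ↔
      (e ∈ pvE sess lbi links ∧ (x = e.2.1 ∨ x = e.2.2)) := by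
  rw [pvAdjFold]
  simp only [List.lookup, Option.getD_none, List.not_mem_nil, false_or]
  rw [pvE_iff]
  tauto

-- ---------- B-side: the flood fill ----------

-- all endpoints of validated edges (the scope can never leave seeds ++ this list)
def pvEps (sess : List String) (lbi : List (String × List (String × String)))
    (links : List String) : List String :=
  (pvE sess lbi links).flatMap (fun e => [e.2.1, e.2.2])

-- a reachability step through one validated edge
theorem pvReach_endpoint {sess : List String} {lbi : List (String × List (String × String))}
    {links seeds : List String} {e : String × String × String} {x : String}
    (hE : e ∈ pvE sess lbi links)
    (hor : pvReach sess lbi links seeds e.2.1 ∨ pvReach sess lbi links seeds e.2.2)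
    (hx : x = e.2.1 ∨ x = e.2.2) (hne : x ≠ "") : pvReach sess lbi links seeds x := by
  have hrE : (e.1, e.2.1, e.2.2) ∈ pvE sess lbi links := by simpa using hE
  rcases hor with h | h
  · exact pvReach.stepS e.1 e.2.1 e.2.2 x hrE hx hne h
  · exact pvReach.stepT e.1 e.2.1 e.2.2 x hrE hx hne h

theorem pvNodup_snoc {o : List String} {x : String} (hno : o.Nodup) (hx : x ∉ o) :
    (o ++ [x]).Nodup := by
  rw [List.nodup_append]
  exact ⟨hno, List.nodup_singleton _,
    by intro a ha b hb hab; rw [List.mem_singleton.mp hb] at hab; exact hx (hab ▸ ha)⟩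

-- everything one visit step does, in one statement
theorem pvVisit_spec {sess : List String} {lbi : List (String × List (String × String))}
    {links seeds : List String} (o l stk : List String) (e : String × String × String)
    (hE : e ∈ pvE sess lbi links)
    (hre : pvReach sess lbi links seeds e.2.1 ∨ pvReach sess lbi links seeds e.2.2)
    (hso : pvSoundO sess lbi links seeds o) (hsl : pvSoundL sess lbi links seeds l)
    (hno : o.Nodup) :
    (o ⊆ (pvVisit (o, l, stk) e).1) ∧ (l ⊆ (pvVisit (o, l, stk) e).2.1) ∧
    (∀ x ∈ stk, x ∈ (pvVisit (o, l, stk) e).2.2) ∧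
    (∀ x ∈ (pvVisit (o, l, stk) e).1, x ∈ o ∨ x ∈ (pvVisit (o, l, stk) e).2.2) ∧
    (∀ x ∈ (pvVisit (o, l, stk) e).2.2, x ∈ stk ∨ x ∈ (pvVisit (o, l, stk) e).1) ∧
    (∀ x ∈ (pvVisit (o, l, stk) e).1, x ∈ o ∨ x = e.2.1 ∨ x = e.2.2) ∧
    pvDone e (pvVisit (o, l, stk) e).1 (pvVisit (o, l, stk) e).2.1 ∧
    pvSoundO sess lbi links seeds (pvVisit (o, l, stk) e).1 ∧
    pvSoundL sess lbi links seeds (pvVisit (o, l, stk) e).2.1 ∧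
    (pvVisit (o, l, stk) e).1.Nodup ∧
    (pvVisit (o, l, stk) e).1.length + stk.length = o.length + (pvVisit (o, l, stk) e).2.2.length := by
  have hrE : (e.1, e.2.1, e.2.2) ∈ pvE sess lbi links := by simpa using hE
  have hll : l ⊆ (if l.contains e.1 = true then l else l ++ [e.1]) := by
    split_ifs
    · exact fun x hx => hx
    · exact List.subset_append_left _ _
  have hlsound : pvSoundL sess lbi links seeds (if l.contains e.1 = true then l else l ++ [e.1]) := by
    intro lid hl
    split_ifs at hl
    · exact hsl lid hl
    · rcases List.mem_append.mp hl with h | h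
      · exact hsl lid h
      · rw [List.mem_singleton.mp h]
        exact ⟨e.2.1, e.2.2, hrE, hre⟩
  have hlid := pvLidAdd_mem l e.1
  simp only [pvVisit]
  by_cases hg1 : (e.2.1 != "" && !(o.contains e.2.1)) = true
  · have hs1 : e.2.1 ∉ o := by
      have := (Bool.and_eq_true_iff.mp hg1).2
      intro hmem
      rw [List.contains_iff_mem.mpr hmem] at this
      cases this
    have hsne : e.2.1 ≠ "" := by
      have := (Bool.and_eq_true_iff.mp hg1).1
      simpa using this
    simp only [if_pos hg1]
    by_cases hg2 : (e.2.2 != "" && !((o ++ [e.2.1]).contains e.2.2)) = true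
    · have ht1 : e.2.2 ∉ o ++ [e.2.1] := by
        have := (Bool.and_eq_true_iff.mp hg2).2
        intro hmem
        rw [List.contains_iff_mem.mpr hmem] at this
        cases this
      have htne : e.2.2 ≠ "" := by
        have := (Bool.and_eq_true_iff.mp hg2).1
        simpa using this
      simp only [if_pos hg2]
      refine ⟨fun x hx => by simp [hx], hll, fun x hx => by simp [hx], ?_, ?_, ?_,
        ⟨hlid, fun _ => by simp, fun _ => by simp⟩, ?_, hlsound,
        pvNodup_snoc (pvNodup_snoc hno hs1) ht1, by simp; try omega⟩
      · intro x hx; simp at hx ⊢; tauto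
      · intro x hx; simp at hx ⊢; tauto
      · intro x hx; simp at hx ⊢; tauto
      · intro x hx
        simp at hx
        rcases hx with hx | hx | hx
        · exact hso x hx
        · exact pvReach_endpoint hE hre (Or.inl hx) (hx ▸ hsne)
        · exact pvReach_endpoint hE hre (Or.inr hx) (hx ▸ htne)
    · simp only [if_neg hg2]
      refine ⟨List.subset_append_left _ _, hll, fun x hx => by simp [hx], ?_, ?_, ?_,
        ⟨hlid, fun _ => by simp, ?_⟩, ?_, hlsound, pvNodup_snoc hno hs1, by simp; try omega⟩
      · intro x hx; simp at hx ⊢; tauto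
      · intro x hx; simp at hx ⊢; tauto
      · intro x hx; simp at hx ⊢; tauto
      · intro ht
        have := pvAddIf_mem (o ++ [e.2.1]) e.2.2 ht
        rw [if_neg hg2] at this
        exact this
      · intro x hx
        simp at hx
        rcases hx with hx | hx
        · exact hso x hx
        · exact pvReach_endpoint hE hre (Or.inl hx) (hx ▸ hsne)
  · simp only [if_neg hg1]
    by_cases hg2 : (e.2.2 != "" && !(o.contains e.2.2)) = true
    · have ht1 : e.2.2 ∉ o := by
        have := (Bool.and_eq_true_iff.mp hg2).2
        intro hmem
        rw [List.contains_iff_mem.mpr hmem] at this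
        cases this
      have htne : e.2.2 ≠ "" := by
        have := (Bool.and_eq_true_iff.mp hg2).1
        simpa using this
      simp only [if_pos hg2]
      refine ⟨List.subset_append_left _ _, hll, fun x hx => by simp [hx], ?_, ?_, ?_,
        ⟨hlid, ?_, fun _ => by simp⟩, ?_, hlsound, pvNodup_snoc hno ht1, by simp; try omega⟩
      · intro x hx; simp at hx ⊢; tauto
      · intro x hx; simp at hx ⊢; tauto
      · intro x hx; simp at hx ⊢; tauto
      · intro hs
        have := pvAddIf_mem o e.2.1 hs
        rw [if_neg hg1] at this
        simp [this]
      · intro x hx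
        simp at hx
        rcases hx with hx | hx
        · exact hso x hx
        · exact pvReach_endpoint hE hre (Or.inr hx) (hx ▸ htne)
    · simp only [if_neg hg2]
      refine ⟨fun x hx => hx, hll, fun x hx => hx, fun x hx => Or.inl hx, fun x hx => Or.inl hx,
        fun x hx => Or.inl hx, ⟨hlid, ?_, ?_⟩, hso, hlsound, hno, by simp; try omega⟩
      · intro hs
        have := pvAddIf_mem o e.2.1 hs
        rw [if_neg hg1] at this
        exact this
      · intro ht
        have := pvAddIf_mem o e.2.2 ht
        rw [if_neg hg2] at this
        exact this

theorem pvFoldVisit_spec {sess : List String} {lbi : List (String × List (String × String))}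
    {links seeds : List String} :
    ∀ (es : List (String × String × String)) (o l stk : List String),
      (∀ e ∈ es, e ∈ pvE sess lbi links ∧
        (pvReach sess lbi links seeds e.2.1 ∨ pvReach sess lbi links seeds e.2.2)) →
      pvSoundO sess lbi links seeds o → pvSoundL sess lbi links seeds l → o.Nodup →
      (o ⊆ (es.foldl pvVisit (o, l, stk)).1) ∧ (l ⊆ (es.foldl pvVisit (o, l, stk)).2.1) ∧
      (∀ x ∈ stk, x ∈ (es.foldl pvVisit (o, l, stk)).2.2) ∧
      (∀ x ∈ (es.foldl pvVisit (o, l, stk)).1, x ∈ o ∨ x ∈ (es.foldl pvVisit (o, l, stk)).2.2) ∧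
      (∀ x ∈ (es.foldl pvVisit (o, l, stk)).2.2, x ∈ stk ∨ x ∈ (es.foldl pvVisit (o, l, stk)).1) ∧
      (∀ x ∈ (es.foldl pvVisit (o, l, stk)).1, x ∈ o ∨ x ∈ pvEps sess lbi links) ∧
      (∀ e ∈ es, pvDone e (es.foldl pvVisit (o, l, stk)).1 (es.foldl pvVisit (o, l, stk)).2.1) ∧
      pvSoundO sess lbi links seeds (es.foldl pvVisit (o, l, stk)).1 ∧
      pvSoundL sess lbi links seeds (es.foldl pvVisit (o, l, stk)).2.1 ∧
      (es.foldl pvVisit (o, l, stk)).1.Nodup ∧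
      (es.foldl pvVisit (o, l, stk)).1.length + stk.length =
        o.length + (es.foldl pvVisit (o, l, stk)).2.2.length := by
  intro es
  induction es with
  | nil =>
    intro o l stk _ hso hsl hno
    simp only [List.foldl_nil]
    exact ⟨fun x hx => hx, fun x hx => hx, fun x hx => hx, fun x hx => Or.inl hx,
      fun x hx => Or.inl hx, fun x hx => Or.inl hx, fun e he => by simp at he, hso, hsl, hno, trivial⟩
  | cons e es ih =>
    intro o l stk hes hso hsl hno
    rw [List.foldl_cons]
    rcases hv : pvVisit (o, l, stk) e with ⟨o1, l1, k1⟩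
    obtain ⟨hE, hre⟩ := hes e (List.mem_cons_self ..)
    have hV := pvVisit_spec (seeds := seeds) o l stk e hE hre hso hsl hno
    rw [hv] at hV
    obtain ⟨a1, a2, a3, a4, a5, a6, a7, a8, a9, a10, a11⟩ := hV
    dsimp only at a11
    have hrec := ih o1 l1 k1 (fun e' he' => hes e' (List.mem_cons_of_mem _ he')) a8 a9 a10
    obtain ⟨b1, b2, b3, b4, b5, b6, b7, b8, b9, b10, b11⟩ := hrec
    refine ⟨a1.trans b1, a2.trans b2, fun x hx => b3 x (a3 x hx), ?_, ?_, ?_, ?_, b8, b9, b10, ?_⟩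
    · intro x hx
      rcases b4 x hx with h | h
      · rcases a4 x h with h' | h'
        · exact Or.inl h'
        · exact Or.inr (b3 x h')
      · exact Or.inr h
    · intro x hx
      rcases b5 x hx with h | h
      · rcases a5 x h with h' | h'
        · exact Or.inl h'
        · exact Or.inr (b1 h')
      · exact Or.inr h
    · intro x hx
      rcases b6 x hx with h | h
      · rcases a6 x h with h' | h' | h'
        · exact Or.inl h'
        · refine Or.inr (List.mem_flatMap.mpr ⟨e, hE, ?_⟩)
          simp [h']
        · refine Or.inr (List.mem_flatMap.mpr ⟨e, hE, ?_⟩)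
          simp [h']
      · exact Or.inr h
    · intro e' he'
      rcases List.mem_cons.mp he' with rfl | he'
      · exact pvDone_mono a7 b1 b2
      · exact b7 e' he'
    · omega

-- the scoped-link list stays duplicate-free through visits
theorem pvVisit_lnodup (st : List String × List String × List String)
    (e : String × String × String) (h : st.2.1.Nodup) : (pvVisit st e).2.1.Nodup := by
  simp only [pvVisit]
  by_cases hc : st.2.1.contains e.1 = true
  · simp only [if_pos hc]; exact h
  · simp only [if_neg hc]
    refine pvNodup_snoc h ?_
    intro hmem
    rw [List.contains_iff_mem.mpr hmem] at hc
    exact hc rfl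

theorem pvFoldVisit_lnodup (es : List (String × String × String)) :
    ∀ (st : List String × List String × List String), st.2.1.Nodup →
      (es.foldl pvVisit st).2.1.Nodup := by
  induction es with
  | nil => intro st h; exact h
  | cons e es ih =>
    intro st h
    rw [List.foldl_cons]
    exact ih _ (pvVisit_lnodup st e h)

-- the pending-work invariant: an edge both of whose in-scope endpoints are off the stack is done
def pvPInv (sess : List String) (lbi : List (String × List (String × String)))
    (links : List String) (o l stk : List String) : Prop :=
  ∀ e ∈ pvE sess lbi links, ∀ x, (x = e.2.1 ∨ x = e.2.2) → x ∈ o → x ∉ stk →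
    pvDone e o l

theorem pvDFS_correct (sess : List String) (lbi : List (String × List (String × String)))
    (links seeds : List String) :
    ∀ (fuel : Nat) (o l stk : List String),
      pvSoundO sess lbi links seeds o → pvSoundL sess lbi links seeds l →
      o.Nodup → l.Nodup → (∀ x ∈ stk, x ∈ o) → (∀ x ∈ o, x ∈ seeds ++ pvEps sess lbi links) →
      pvPInv sess lbi links o l stk →
      stk.length + 2 * (seeds ++ pvEps sess lbi links).length < fuel + 2 * o.length →
      ∃ o' l', pvDFS (links.foldl (pvIndex sess lbi) []) fuel o l stk = (o', l') ∧
        pvSoundO sess lbi links seeds o' ∧ pvSoundL sess lbi links seeds l' ∧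
        o'.Nodup ∧ l'.Nodup ∧ (∀ x ∈ o, x ∈ o') ∧ pvClosed sess lbi links o' l' := by
  intro fuel
  induction fuel with
  | zero =>
    intro o l stk hso hsl hno hnl hstk hcov hpinv hmu
    exfalso
    have hlen : o.length ≤ (seeds ++ pvEps sess lbi links).length :=
      (hno.subperm hcov).length_le
    omega
  | succ n ih =>
    intro o l stk hso hsl hno hnl hstk hcov hpinv hmu
    cases stk with
    | nil =>
      simp only [pvDFS]
      refine ⟨o, l, rfl, hso, hsl, hno, hnl, fun x hx => hx, ?_⟩
      intro e he hm
      rcases hm with hm | hm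
      · exact hpinv e he e.2.1 (Or.inl rfl) hm (by simp)
      · exact hpinv e he e.2.2 (Or.inr rfl) hm (by simp)
    | cons obj rest =>
      simp only [pvDFS]
      rcases hF : ((List.lookup obj (links.foldl (pvIndex sess lbi) [])).getD []).foldl
          pvVisit (o, l, rest) with ⟨o1, l1, k1⟩
      have hobj : obj ∈ o := hstk obj (List.mem_cons_self ..)
      have hReachObj : pvReach sess lbi links seeds obj := hso obj hobj
      have hes : ∀ e ∈ (List.lookup obj (links.foldl (pvIndex sess lbi) [])).getD [],
          e ∈ pvE sess lbi links ∧
            (pvReach sess lbi links seeds e.2.1 ∨ pvReach sess lbi links seeds e.2.2) := by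
        intro e he
        have h := (pvAdj_char sess lbi links obj e).mp he
        refine ⟨h.1, ?_⟩
        rcases h.2 with h2 | h2
        · exact Or.inl (h2 ▸ hReachObj)
        · exact Or.inr (h2 ▸ hReachObj)
      have hFold := pvFoldVisit_spec (seeds := seeds) _ o l rest hes hso hsl hno
      rw [hF] at hFold
      obtain ⟨b1, b2, b3, b4, b5, b6, b7, b8, b9, b10, b11⟩ := hFold
      dsimp only at b11
      have hnl1 : l1.Nodup := by
        have := pvFoldVisit_lnodup ((List.lookup obj (links.foldl (pvIndex sess lbi) [])).getD [])
          (o, l, rest) hnl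
        rw [hF] at this
        exact this
      have hstk1 : ∀ x ∈ k1, x ∈ o1 := by
        intro x hx
        rcases b5 x hx with h | h
        · exact b1 (hstk x (List.mem_cons_of_mem _ h))
        · exact h
      have hcov1 : ∀ x ∈ o1, x ∈ seeds ++ pvEps sess lbi links := by
        intro x hx
        rcases b6 x hx with h | h
        · exact hcov x h
        · exact List.mem_append_right _ h
      have hpinv1 : pvPInv sess lbi links o1 l1 k1 := by
        intro e he x hx hxo1 hxk1
        rcases b4 x hxo1 with hxo | hxk
        · by_cases hxobj : x = obj
          · have he' : e ∈ (List.lookup obj (links.foldl (pvIndex sess lbi) [])).getD [] := by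
              refine (pvAdj_char sess lbi links obj e).mpr ⟨he, ?_⟩
              rw [← hxobj]
              exact hx
            exact b7 e he'
          · have hxstk : x ∉ obj :: rest := by
              intro hmem
              rcases List.mem_cons.mp hmem with h | h
              · exact hxobj h
              · exact hxk1 (b3 x h)
            exact pvDone_mono (hpinv e he x hx hxo hxstk) b1 b2
        · exact absurd hxk hxk1
      have hlen1 : o.length ≤ o1.length := (hno.subperm b1).length_le
      have hmu1 : k1.length + 2 * (seeds ++ pvEps sess lbi links).length < n + 2 * o1.length := by
        simp only [List.length_cons] at hmu
        omega
      obtain ⟨o', l', hrec, hr⟩ := ih o1 l1 k1 b8 b9 b10 hnl1 hstk1 hcov1 hpinv1 hmu1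
      exact ⟨o', l', hrec, hr.1, hr.2.1, hr.2.2.1, hr.2.2.2.1,
        fun x hx => hr.2.2.2.2.1 x (b1 hx), hr.2.2.2.2.2⟩

-- ---------- assembly ----------

theorem pvSeeds_nodup (req sess : List String) :
    (PySem.Set.inter (PySem.Set.ofList req) sess).Nodup := by
  unfold PySem.Set.inter
  exact List.Nodup.filter _ (PySem.Set.nodup_ofList req)

theorem pvEps_length (sess : List String) (lbi : List (String × List (String × String)))
    (links : List String) :
    (pvEps sess lbi links).length = 2 * (pvE sess lbi links).length := by
  unfold pvEps
  induction pvE sess lbi links with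
  | nil => rfl
  | cons e es ih =>
    simp only [List.flatMap_cons, List.length_append, List.length_cons, ih]
    simp
    omega

-- ===== VERDICT (by name: the statement is the Claim_ definition above) =====
theorem object_narrowed_scope_py_spec : Claim_equal_object_narrowed_scope_py := by
  unfold Claim_equal_object_narrowed_scope_py
  intro req sess links lbi _
  unfold Spec_object_narrowed_scope_py
  unfold object_narrowed_scope_py object_narrowed_scope_py_alt
  dsimp only
  have hnd := pvSeeds_nodup req sess
  rw [PySem.Set.ofList_eq_self_of_nodup _ hnd]
  -- A: the fixpoint loop reaches a closed, sound state
  have hmuA : pvMu (pvE sess lbi links) PySem.Set.empty < links.length + 1 := by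
    calc pvMu (pvE sess lbi links) PySem.Set.empty
        ≤ ((pvE sess lbi links).map (·.1)).length := List.length_filter_le _ _
      _ = (pvE sess lbi links).length := List.length_map ..
      _ ≤ links.length := List.length_filterMap_le _ _
      _ < links.length + 1 := Nat.lt_succ_self _
  obtain ⟨oA, lA, hAeq, hAso, hAsl, hAno, hAnl, hAsub, hAcl⟩ :=
    pvLoopA_correct sess lbi links (PySem.Set.inter (PySem.Set.ofList req) sess)
      (links.length + 1) (PySem.Set.inter (PySem.Set.ofList req) sess) PySem.Set.empty
      (fun x hx => pvReach.seed x hx)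
      (fun lid h => by simp [PySem.Set.empty] at h)
      (fun e ha hmem => absurd hmem (by simp [PySem.Set.empty]))
      hnd (by simp [PySem.Set.empty]) hmuA
  -- B: the flood fill reaches a closed, sound state
  have hSlen : (PySem.Set.inter (PySem.Set.ofList req) sess).length ≤ req.length := by
    have h1 : (PySem.Set.inter (PySem.Set.ofList req) sess).length ≤
        (PySem.Set.ofList req).length := by
      unfold PySem.Set.inter
      exact List.length_filter_le _ _
    exact le_trans h1 (PySem.Set.length_ofList_le req)
  have hmuB : (PySem.Set.inter (PySem.Set.ofList req) sess).reverse.length +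
      2 * ((PySem.Set.inter (PySem.Set.ofList req) sess) ++ pvEps sess lbi links).length <
      (2 * req.length + 4 * links.length + 1) +
        2 * (PySem.Set.inter (PySem.Set.ofList req) sess).length := by
    have h1 := pvEps_length sess lbi links
    have h2 : (pvE sess lbi links).length ≤ links.length := List.length_filterMap_le _ _
    simp only [List.length_reverse, List.length_append]
    omega
  obtain ⟨oB, lB, hBeq, hBso, hBsl, hBno, hBnl, hBsub, hBcl⟩ :=
    pvDFS_correct sess lbi links (PySem.Set.inter (PySem.Set.ofList req) sess)
      (2 * req.length + 4 * links.length + 1)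
      (PySem.Set.inter (PySem.Set.ofList req) sess) PySem.Set.empty
      (PySem.Set.inter (PySem.Set.ofList req) sess).reverse
      (fun x hx => pvReach.seed x hx)
      (fun lid h => by simp [PySem.Set.empty] at h)
      hnd (by simp [PySem.Set.empty])
      (fun x hx => List.mem_reverse.mp hx)
      (fun x hx => List.mem_append_left _ hx)
      (fun e he x hx hxo hxstk => absurd (List.mem_reverse.mpr hxo) hxstk)
      hmuB
  rw [hAeq, hBeq]
  -- both results carry the same set of objects and the same set of links
  have hpermO : oA.Perm oB := by
    rw [List.perm_ext_iff_of_nodup hAno hBno]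
    intro x
    constructor
    · intro hx
      exact pvReach_mem hBsub hBcl x (hAso x hx)
    · intro hx
      exact pvReach_mem hAsub hAcl x (hBso x hx)
  have hpermL : lA.Perm lB := by
    rw [List.perm_ext_iff_of_nodup hAnl hBnl]
    intro lid
    constructor
    · intro hx
      exact pvLinked_mem hBcl (pvReach_mem hBsub hBcl) lid (hAsl lid hx)
    · intro hx
      exact pvLinked_mem hAcl (pvReach_mem hAsub hAcl) lid (hBsl lid hx)
  rw [PySem.List.sorted_eq_sorted_of_perm oA oB _ (fun a b h => h) hpermO,
    PySem.List.sorted_eq_sorted_of_perm lA lB _ (fun a b h => h) hpermL]
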